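-- pv_equiv track=rewrite | github.com/Samridhaa-28/Nexresolve | preprocessing/clean_issues.py | primary_label
-- ===== SOURCE A (Python) =====
-- def primary_label(normalised: str) -> str:
--     """Return the most informative single label for downstream modelling."""
--     priority = ["bug", "question", "enhancement", "error", "billing",
--                 "help_wanted", "triage", "info_needed", "invalid",
--                 "duplicate", "wontfix", "released", "ai_translated", "unlabelled"]
--     lbls = normalised.split("|")
--     for p in priority:
--         if p in lbls:
--             return p
--     return lbls[0] if lbls else "unlabelled"
-- ===== SOURCE B (Python) =====
-- def primary_label(normalised: str) -> str:
--     """Return the most informative single label for downstream modelling."""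
--     priority = ["bug", "question", "enhancement", "error", "billing",
--                 "help_wanted", "triage", "info_needed", "invalid",
--                 "duplicate", "wontfix", "released", "ai_translated", "unlabelled"]
--     rank = {label: i for i, label in enumerate(priority)}
--     lbls = normalised.split("|")
--     best = None
--     for l in lbls:
--         r = rank.get(l)
--         if r is not None and (best is None or r < best):
--             best = r
--     return priority[best] if best is not None else lbls[0]
-- ===== Notes on version B (the rewrite author's own statement) =====
-- stated objective: alternative
-- what changed: Instead of scanning the label list once per priority entry (outer loop over priority, inner membership scan), B builds a rank dict once and makes a single pass over the split labels keeping the minimum rank, returning priority[min rank] or the first label.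
import Mathlib
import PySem

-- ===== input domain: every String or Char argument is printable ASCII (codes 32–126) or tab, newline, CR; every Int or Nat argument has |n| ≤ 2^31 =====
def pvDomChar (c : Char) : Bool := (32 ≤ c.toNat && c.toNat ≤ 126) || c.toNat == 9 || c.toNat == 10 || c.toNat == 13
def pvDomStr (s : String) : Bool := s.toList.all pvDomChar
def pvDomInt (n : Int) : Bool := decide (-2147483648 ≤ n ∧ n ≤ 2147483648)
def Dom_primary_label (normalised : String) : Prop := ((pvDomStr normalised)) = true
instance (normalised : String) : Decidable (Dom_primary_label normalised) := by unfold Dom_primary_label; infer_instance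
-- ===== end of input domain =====

-- B replaces A's per-priority membership scans by one rank dict and a single min-rank pass over the labels.


-- ===== PORT A =====
def pvPriority : List String :=
  ["bug", "question", "enhancement", "error", "billing",
   "help_wanted", "triage", "info_needed", "invalid",
   "duplicate", "wontfix", "released", "ai_translated", "unlabelled"]

-- the `for p in priority: if p in lbls: return p` loop; the [] case is the code after the loop
def pvFindFirst : List String → List String → String
  | [], lbls => match lbls with
    | [] => "unlabelled"          -- `lbls[0] if lbls else "unlabelled"`
    | x :: _ => x
  | p :: ps, lbls => if lbls.contains p then p else pvFindFirst ps lbls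

def primary_label (normalised : String) : String :=
  let lbls := (PySem.Chars.splitOn normalised.toList ['|']).map String.mk
  pvFindFirst pvPriority lbls

-- ===== PORT B =====
-- rank = {label: i for i, label in enumerate(priority)}  (indices are the nonnegative enumerate counters, stored as Nat)
def pvRank : PySem.Dict String Nat :=
  (PySem.List.enumerate pvPriority).foldl (fun d p => d.insert p.2 p.1.toNat) PySem.Dict.empty

def primary_label_alt (normalised : String) : String :=
  let lbls := (PySem.Chars.splitOn normalised.toList ['|']).map String.mk
  let best := lbls.foldl (fun acc l =>
      match pvRank.get? l with
      | none => acc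
      | some r => match acc with
        | none => some r
        | some b => if r < b then some r else acc) (none : Option Nat)
  match best with
  | some b => pvPriority.getD b ""   -- priority[best]; best is always a valid index
  | none => lbls.headD ""            -- lbls[0]; lbls is never [] (split returns a nonempty list)

-- ===== PRECONDITION & SPEC =====
def Spec_primary_label (normalised : String) (out : String) : Prop := out = primary_label_alt normalised
instance (normalised : String) (out : String) : Decidable (Spec_primary_label normalised out) := by unfold Spec_primary_label; infer_instance

-- ===== CLAIM (what is proved, stated in full; the proofs are below) =====
def Claim_equal_primary_label : Prop := ∀ (normalised : String), Dom_primary_label normalised → Spec_primary_label normalised (primary_label normalised)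

-- ===== LEMMAS AND PROOFS =====

-- option-minimum used to describe B's running best rank
def pvBmin : Option Nat → Option Nat → Option Nat
  | none, b => b
  | some a, none => some a
  | some a, some b => some (min a b)

-- index of the first occurrence of l in a list, counting from i
def pvIdx (l : String) : List String → Nat → Option Nat
  | [], _ => none
  | q :: Q, i => if q == l then some i else pvIdx l Q (i + 1)

-- minimum over xs of the rank (position in Q, from i) of each label
def pvMQ (Q : List String) (i : Nat) (xs : List String) : Option Nat :=
  xs.foldr (fun l m => pvBmin (pvIdx l Q i) m) none

theorem pvMQ_cons (Q : List String) (i : Nat) (x : String) (xs : List String) :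
    pvMQ Q i (x :: xs) = pvBmin (pvIdx x Q i) (pvMQ Q i xs) := rfl

theorem pvBmin_none_right (a : Option Nat) : pvBmin a none = a := by
  cases a <;> rfl

theorem pvBmin_zero_left (m : Option Nat) : pvBmin (some 0) m = some 0 := by
  cases m <;> simp [pvBmin]

theorem pvBmin_zero_right (a : Option Nat) : pvBmin a (some 0) = some 0 := by
  cases a <;> simp [pvBmin]

theorem pvBmin_assoc (a b c : Option Nat) :
    pvBmin (pvBmin a b) c = pvBmin a (pvBmin b c) := by
  cases a <;> cases b <;> cases c <;> simp [pvBmin, Nat.min_assoc]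

theorem pvRank_eq (l : String) : pvRank.get? l = pvIdx l pvPriority 0 := by
  have h : pvRank = PySem.Dict.mk
      [("bug", 0), ("question", 1), ("enhancement", 2), ("error", 3), ("billing", 4),
       ("help_wanted", 5), ("triage", 6), ("info_needed", 7), ("invalid", 8),
       ("duplicate", 9), ("wontfix", 10), ("released", 11), ("ai_translated", 12),
       ("unlabelled", 13)] := by decide
  have h0 : (PySem.Dict.mk ([] : List (String × Nat))).get? l = none := rfl
  rw [h]
  simp only [PySem.Dict.get?_mk_cons, pvIdx, pvPriority, h0]

theorem pvIdx_shift (l : String) (Q : List String) (i : Nat) :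
    pvIdx l Q (i + 1) = (pvIdx l Q i).map (· + 1) := by
  induction Q generalizing i with
  | nil => rfl
  | cons q Q ih => by_cases h : q == l <;> simp [pvIdx, h, ih]

theorem pvBmin_map (a b : Option Nat) :
    pvBmin (a.map (· + 1)) (b.map (· + 1)) = (pvBmin a b).map (· + 1) := by
  cases a <;> cases b <;> simp [pvBmin, Nat.succ_min_succ]

theorem pvMQ_nil_label (xs : List String) : pvMQ [] 0 xs = none := by
  induction xs with
  | nil => rfl
  | cons x xs ih => rw [pvMQ_cons, ih]; rfl

theorem pvMQ_zero_of_mem (q : String) (Q : List String) (xs : List String)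
    (h : xs.contains q = true) : pvMQ (q :: Q) 0 xs = some 0 := by
  induction xs with
  | nil => simp at h
  | cons x xs ih =>
    rw [pvMQ_cons]
    by_cases hx : q = x
    · subst hx
      have : pvIdx q (q :: Q) 0 = some 0 := by simp [pvIdx]
      rw [this, pvBmin_zero_left]
    · have hxs : xs.contains q = true := by
        simp only [List.contains_cons, Bool.or_eq_true, beq_iff_eq] at h
        rcases h with h | h
        · exact absurd h hx
        · exact h
      rw [ih hxs, pvBmin_zero_right]

theorem pvMQ_shift_of_not_mem (q : String) (Q : List String) (xs : List String)
    (h : xs.contains q = false) : pvMQ (q :: Q) 0 xs = (pvMQ Q 0 xs).map (· + 1) := by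
  induction xs with
  | nil => rfl
  | cons x xs ih =>
    simp only [List.contains_cons, Bool.or_eq_false_iff, beq_eq_false_iff_ne] at h
    obtain ⟨hxq, hxs⟩ := h
    rw [pvMQ_cons, pvMQ_cons, ih hxs]
    have hq : (q == x) = false := by
      simpa [beq_eq_false_iff_ne] using hxq

    have : pvIdx x (q :: Q) 0 = (pvIdx x Q 0).map (· + 1) := by
      simp only [pvIdx, hq, Bool.false_eq_true, if_false, pvIdx_shift]
    rw [this]
    exact pvBmin_map _ _

theorem pvMain (Q : List String) (xs : List String) :
    pvFindFirst Q xs =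
      match pvMQ Q 0 xs with
      | some r => Q.getD r ""
      | none => (match xs with | [] => "unlabelled" | x :: _ => x) := by
  induction Q with
  | nil => rw [pvMQ_nil_label]; cases xs <;> rfl
  | cons q Q ih =>
    have hstep : pvFindFirst (q :: Q) xs = if xs.contains q then q else pvFindFirst Q xs := rfl
    by_cases h : xs.contains q
    · rw [hstep, if_pos h, pvMQ_zero_of_mem q Q xs h]; rfl
    · have h' : xs.contains q = false := by simpa using h
      rw [hstep, if_neg h, pvMQ_shift_of_not_mem q Q xs h', ih]
      cases pvMQ Q 0 xs <;> simp [List.getD]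

theorem pvStep_eq (acc : Option Nat) (x : String) :
    (match pvRank.get? x with
      | none => acc
      | some r => match acc with
        | none => some r
        | some b => if r < b then some r else acc)
    = pvBmin acc (pvRank.get? x) := by
  cases pvRank.get? x with
  | none => cases acc <;> rfl
  | some r =>
    cases acc with
    | none => rfl
    | some b =>
      simp only [pvBmin]
      split <;> (congr 1; simp [Nat.min_def]; omega)

theorem pvFoldl_eq (xs : List String) (acc : Option Nat) :
    xs.foldl (fun acc l =>
      match pvRank.get? l with
      | none => acc
      | some r => match acc with
        | none => some r
        | some b => if r < b then some r else acc) acc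
    = pvBmin acc (pvMQ pvPriority 0 xs) := by
  induction xs generalizing acc with
  | nil => simp [pvMQ, pvBmin_none_right]
  | cons x xs ih =>
    rw [List.foldl_cons, ih, pvStep_eq, pvMQ_cons, ← pvRank_eq]
    exact pvBmin_assoc _ _ _

theorem pvSplit_go_ne_nil (sep : List Char) (fuel : Nat) :
    ∀ (l cur : List Char) (acc : List (List Char)),
      PySem.Chars.splitOn.go sep fuel l cur acc ≠ [] := by
  induction fuel with
  | zero => intro l cur acc; simp [PySem.Chars.splitOn.go]
  | succ n ih =>
    intro l cur acc
    cases l with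
    | nil => simp [PySem.Chars.splitOn.go]
    | cons c rest =>
      rw [PySem.Chars.splitOn.go]
      split
      · exact ih _ _ _
      · exact ih _ _ _

theorem pvSplit_ne_nil (s : List Char) : PySem.Chars.splitOn s ['|'] ≠ [] := by
  unfold PySem.Chars.splitOn
  exact pvSplit_go_ne_nil _ _ _ _ _

theorem pvCore (xs : List String) (hne : xs ≠ []) :
    pvFindFirst pvPriority xs =
      (match xs.foldl (fun acc l =>
          match pvRank.get? l with
          | none => acc
          | some r => match acc with
            | none => some r
            | some b => if r < b then some r else acc) (none : Option Nat) with
        | some b => pvPriority.getD b ""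
        | none => xs.headD "") := by
  rw [pvFoldl_eq, pvMain]
  have hnone : pvBmin none (pvMQ pvPriority 0 xs) = pvMQ pvPriority 0 xs := rfl
  rw [hnone]
  cases xs with
  | nil => exact absurd rfl hne
  | cons x t => cases pvMQ pvPriority 0 (x :: t) <;> simp [List.headD]

-- ===== VERDICT (by name: the statement is the Claim_ definition above) =====
theorem primary_label_spec : Claim_equal_primary_label := by
  intro normalised _
  show pvFindFirst pvPriority ((PySem.Chars.splitOn normalised.toList ['|']).map String.mk)
      = (match ((PySem.Chars.splitOn normalised.toList ['|']).map String.mk).foldl (fun acc l =>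
            match pvRank.get? l with
            | none => acc
            | some r => match acc with
              | none => some r
              | some b => if r < b then some r else acc) (none : Option Nat) with
          | some b => pvPriority.getD b ""
          | none => ((PySem.Chars.splitOn normalised.toList ['|']).map String.mk).headD "")
  exact pvCore _ (fun hc => pvSplit_ne_nil _ (List.map_eq_nil_iff.mp hc))
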